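-- pv_equiv track=rewrite | github.com/emphasis7458/threads-of-grace | scripts/fix_titles.py | find_near_match_titles
-- ===== SOURCE A (Python) =====
-- from collections import defaultdict
--
-- def normalize_for_grouping(title):
--     """
--     Normalize a title for grouping comparison.
--     Strips trailing punctuation and normalizes case.
--     """
--     normalized = title.strip()
--     while normalized and normalized[-1] in '!?.,:;':
--         normalized = normalized[:-1]
--     return normalized.lower().strip()
--
-- def find_near_match_titles(all_titles):
--     """
--     Find titles that would be grouped together due to punctuation differences.
--     Returns dict: normalized_title -> list of (filename, actual_title) tuples
--     """
--     groups = defaultdict(list)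
--     for filename, title in all_titles:
--         norm = normalize_for_grouping(title)
--         groups[norm].append((filename, title))
--
--     # Only return groups with multiple DIFFERENT titles
--     near_matches = {}
--     for norm, items in groups.items():
--         unique_titles = set(title for _, title in items)
--         if len(unique_titles) > 1:
--             near_matches[norm] = items
--
--     return near_matches
-- ===== SOURCE B (Python) =====
-- def normalize_for_grouping(title):
--     normalized = title.strip()
--     while normalized and normalized[-1] in '!?.,:;':
--         normalized = normalized[:-1]
--     return normalized.lower().strip()
--
-- def find_near_match_titles(all_titles):
--     # distinct normalized keys in first-occurrence order, then a dict
--     # comprehension that rebuilds each group by scanning all_titles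
--     norms = list(dict.fromkeys(normalize_for_grouping(t) for _, t in all_titles))
--     return {n: items
--             for n in norms
--             for items in [[(f, t) for f, t in all_titles
--                            if normalize_for_grouping(t) == n]]
--             if len({t for _, t in items}) > 1}
-- ===== Notes on version B (the rewrite author's own statement) =====
-- stated objective: alternative
-- what changed: B drops the defaultdict accumulation entirely: it dedups the normalized keys in first-occurrence order and then builds the result as one dict comprehension that re-collects each group by scanning all_titles and keeps only keys with more than one distinct title.
import Mathlib
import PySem

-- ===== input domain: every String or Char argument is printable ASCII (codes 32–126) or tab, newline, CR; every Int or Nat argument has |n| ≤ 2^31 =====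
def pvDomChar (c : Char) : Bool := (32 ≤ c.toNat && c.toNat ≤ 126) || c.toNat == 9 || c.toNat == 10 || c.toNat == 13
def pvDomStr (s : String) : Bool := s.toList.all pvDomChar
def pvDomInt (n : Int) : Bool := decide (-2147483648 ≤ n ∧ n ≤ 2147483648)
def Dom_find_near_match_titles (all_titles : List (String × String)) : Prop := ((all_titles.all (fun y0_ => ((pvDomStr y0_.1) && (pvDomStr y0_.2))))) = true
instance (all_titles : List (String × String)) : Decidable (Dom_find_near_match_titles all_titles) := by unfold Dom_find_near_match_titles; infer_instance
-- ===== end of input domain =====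

-- B replaces A's defaultdict accumulation by deduping the normalized keys and rebuilding each group with a scan of all_titles; same return value, no speed claim.

-- ===== PORT A =====
-- shared helper normalize_for_grouping (identical in A and B)
def pvPunct : List Char := ['!', '?', '.', ',', ':', ';']

-- while normalized and normalized[-1] in '!?.,:;': normalized = normalized[:-1]
def pvStripPunctLoop (cs : List Char) : List Char :=
  match h : cs.getLast? with
  | some c => if pvPunct.contains c then pvStripPunctLoop cs.dropLast else cs
  | none => cs
termination_by cs.length
decreasing_by
  cases cs with
  | nil => simp at h
  | cons a as => simp

def normalize_for_grouping (title : String) : String :=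
  let normalized := PySem.Chars.strip title.toList
  let normalized := pvStripPunctLoop normalized
  String.ofList (PySem.Chars.strip (PySem.Chars.lower normalized))

def find_near_match_titles (all_titles : List (String × String)) : List (String × List (String × String)) :=
  let groups := all_titles.foldl
    (fun d p => d.modify (normalize_for_grouping p.2) [] (· ++ [p]))
    PySem.Dict.empty
  let near_matches := groups.items.foldl
    (fun d q =>
      if (PySem.Set.ofList (q.2.map Prod.snd)).length > 1 then d.insert q.1 q.2 else d)
    PySem.Dict.empty
  near_matches.items

-- ===== PORT B =====
-- norms = list(dict.fromkeys(...)); the dict comprehension has provably distinct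
-- keys (norms is deduped), so it is ported directly as a map-then-filter list of pairs.
def find_near_match_titles_alt (all_titles : List (String × String)) : List (String × List (String × String)) :=
  let norms := PySem.List.dedup (all_titles.map (fun p => normalize_for_grouping p.2))
  (norms.map (fun n => (n, all_titles.filter (fun p => normalize_for_grouping p.2 == n)))).filter
    (fun q => (PySem.Set.ofList (q.2.map Prod.snd)).length > 1)

-- ===== PRECONDITION & SPEC =====
def Spec_find_near_match_titles (all_titles : List (String × String)) (out : List (String × List (String × String))) : Prop := out = find_near_match_titles_alt all_titles
instance (all_titles : List (String × String)) (out : List (String × List (String × String))) : Decidable (Spec_find_near_match_titles all_titles out) := by unfold Spec_find_near_match_titles; infer_instance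

-- ===== CLAIM (what is proved, stated in full; the proofs are below) =====
def Claim_equal_find_near_match_titles : Prop := ∀ (all_titles : List (String × String)), Dom_find_near_match_titles all_titles → Spec_find_near_match_titles all_titles (find_near_match_titles all_titles)

-- ===== LEMMAS AND PROOFS =====

-- A conditional-insert loop over pairs with fresh distinct keys appends the passing pairs.
theorem items_foldl_insert_if (P : String → List (String × String) → Prop)
    [inst : ∀ k v, Decidable (P k v)]
    (L : List (String × List (String × String))) (d : PySem.Dict String (List (String × String)))
    (hfresh : ∀ k ∈ L.map Prod.fst, d.contains k = false)
    (hnd : (L.map Prod.fst).Nodup) :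
    (L.foldl (fun d q => if P q.1 q.2 then d.insert q.1 q.2 else d) d).items
      = d.items ++ L.filter (fun q => decide (P q.1 q.2)) := by
  induction L generalizing d with
  | nil => simp
  | cons q L ih =>
    simp only [List.map_cons, List.nodup_cons, List.mem_map] at hnd
    have hq : d.contains q.1 = false := hfresh q.1 (by simp)
    by_cases hp : P q.1 q.2
    · have hfresh' : ∀ k ∈ L.map Prod.fst, (d.insert q.1 q.2).contains k = false := by
        intro k hk
        rw [PySem.Dict.contains_insert]
        have hne : k ≠ q.1 := by
          rintro rfl
          exact hnd.1 (by simpa using hk)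
        simp [hne, hfresh k (by simp [hk])]
      simp only [List.foldl_cons, if_pos hp]
      rw [ih _ hfresh' hnd.2, PySem.Dict.items_insert_of_not_contains (h := hq)]
      simp [hp]
    · simp only [List.foldl_cons, if_neg hp]
      rw [ih _ (fun k hk => hfresh k (by simp [hk])) hnd.2]
      simp [hp]

theorem groups_items (all_titles : List (String × String)) :
    (all_titles.foldl (fun d p => d.modify (normalize_for_grouping p.2) [] (· ++ [p])) PySem.Dict.empty).items
      = (PySem.List.dedup (all_titles.map (fun p => normalize_for_grouping p.2))).map
          (fun n => (n, all_titles.filter (fun p => normalize_for_grouping p.2 == n))) := by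
  set groups := all_titles.foldl (fun d p => d.modify (normalize_for_grouping p.2) [] (· ++ [p])) PySem.Dict.empty with hg
  have hnd : groups.keys.Nodup := by
    rw [hg]
    exact PySem.Dict.nodup_keys_foldl_modify_key all_titles (fun p => normalize_for_grouping p.2) []
      (fun d x => (· ++ [x])) PySem.Dict.empty PySem.Dict.nodup_keys_empty
  have hkeys : groups.keys = PySem.List.dedup (all_titles.map (fun p => normalize_for_grouping p.2)) := by
    rw [hg, PySem.Dict.keys_foldl_modify_key]
    simp [PySem.Dict.keys_empty, PySem.Set.update_nil_left]
  have hgetD : ∀ c, groups.getD c [] = all_titles.filter (fun p => normalize_for_grouping p.2 == c) := by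
    intro c
    have : groups = (all_titles.map (fun p => (normalize_for_grouping p.2, p))).foldl
        (fun d q => d.modify q.1 [] (· ++ [q.2])) PySem.Dict.empty := by
      rw [hg, List.foldl_map]
    rw [this, PySem.Dict.getD_foldl_modify_append]
    simp [PySem.Dict.getD_empty, List.filter_map, Function.comp_def]
  rw [PySem.Dict.items_eq_map_keys groups hnd [], hkeys]
  exact List.map_congr_left (fun k _ => by rw [hgetD k] )

-- ===== VERDICT (by name: the statement is the Claim_ definition above) =====
theorem find_near_match_titles_spec : Claim_equal_find_near_match_titles := by
  intro all_titles _
  unfold Spec_find_near_match_titles find_near_match_titles find_near_match_titles_alt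
  simp only []
  have hG := groups_items all_titles
  set norms := PySem.List.dedup (all_titles.map (fun p => normalize_for_grouping p.2)) with hn
  set L := norms.map (fun n => (n, all_titles.filter (fun p => normalize_for_grouping p.2 == n))) with hL
  have hndn : norms.Nodup := PySem.List.nodup_dedup _
  have hndL : (L.map Prod.fst).Nodup := by simpa [hL, Function.comp_def] using hndn
  have hA := items_foldl_insert_if
    (fun _ v => (PySem.Set.ofList (v.map Prod.snd)).length > 1)
    ((all_titles.foldl (fun d p => d.modify (normalize_for_grouping p.2) [] (· ++ [p])) PySem.Dict.empty).items)
    PySem.Dict.empty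
    (fun k _ => PySem.Dict.contains_empty k)
    (by rw [hG]; exact hndL)
  rw [hA, hG]
  simp [PySem.Dict.empty]
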